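-- pv_equiv track=rewrite | github.com/OpenBlatam/AI-Models-Clone | agents/backend/onyx/server/features/addiction_recovery_ai/services/recovery_barriers_analysis_service.py | _generate_barrier_recommendations
-- ===== SOURCE A (Python) =====
-- from typing import Dict, List, Optional
--
-- def _generate_barrier_recommendations(barriers: List[Dict]) -> List[str]:
--     """Genera recomendaciones de barreras"""
--     recommendations = []
--
--     financial_barriers = [b for b in barriers if b.get("type") == "financial"]
--     if financial_barriers:
--         recommendations.append("Busca recursos financieros y programas de asistencia")
--
--     social_barriers = [b for b in barriers if b.get("type") == "social"]
--     if social_barriers: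
--         recommendations.append("Fortalecer tu red de apoyo social es crucial")
--
--     return recommendations
-- ===== SOURCE B (Python) =====
-- _RULES = (
--     ("financial", "Busca recursos financieros y programas de asistencia"),
--     ("social", "Fortalecer tu red de apoyo social es crucial"),
-- )
--
-- def _generate_barrier_recommendations(barriers):
--     """Table-driven single pass: one loop over barriers sets per-rule flags
--     (stopping early once every rule fired); the result is read off the table."""
--     flags = [False] * len(_RULES)
--     for b in barriers:
--         t = b.get("type")
--         for i, (typ, _) in enumerate(_RULES):
--             if t == typ:
--                 flags[i] = True
--         if all(flags):
--             break
--     return [msg for (typ, msg), hit in zip(_RULES, flags) if hit]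
-- ===== Notes on version B (the rewrite author's own statement) =====
-- stated objective: alternative
-- what changed: Replaces A's two independent list-filtering scans with a data-driven design: a rules table and one loop over barriers that sets per-rule flags with an early break once all rules fired, the output then read off the table.
import Mathlib
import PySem

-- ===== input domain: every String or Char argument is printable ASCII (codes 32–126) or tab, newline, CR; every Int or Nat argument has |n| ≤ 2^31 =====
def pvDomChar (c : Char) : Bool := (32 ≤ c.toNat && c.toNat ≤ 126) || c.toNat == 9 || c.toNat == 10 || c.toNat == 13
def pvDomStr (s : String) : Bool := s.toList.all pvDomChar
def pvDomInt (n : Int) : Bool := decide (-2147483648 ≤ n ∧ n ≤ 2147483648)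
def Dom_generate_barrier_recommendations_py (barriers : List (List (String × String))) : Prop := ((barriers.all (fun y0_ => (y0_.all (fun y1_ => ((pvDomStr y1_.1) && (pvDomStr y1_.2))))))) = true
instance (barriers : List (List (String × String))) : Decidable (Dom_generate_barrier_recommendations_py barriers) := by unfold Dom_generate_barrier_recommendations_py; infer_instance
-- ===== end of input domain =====

-- B replaces A's two list-filtering scans with a rules table and one early-exit flag loop (alternative decomposition; same return value).


-- ===== PORT A =====
-- A: two list-filtering scans of barriers, appending a recommendation if each filter is non-empty
def generate_barrier_recommendations_py (barriers : List (List (String × String))) : List String :=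
  let recommendations : List String := []
  let financial_barriers := barriers.filter (fun b => (PySem.Dict.mk b).get? "type" == some "financial")
  let recommendations := if financial_barriers.isEmpty then recommendations
    else recommendations ++ ["Busca recursos financieros y programas de asistencia"]
  let social_barriers := barriers.filter (fun b => (PySem.Dict.mk b).get? "type" == some "social")
  let recommendations := if social_barriers.isEmpty then recommendations
    else recommendations ++ ["Fortalecer tu red de apoyo social es crucial"]
  recommendations

-- ===== PORT B =====
-- B (my re-implementation): rules table + one loop setting per-rule flags, breaking early when all fired
def bRules : List (String × String) :=
  [("financial", "Busca recursos financieros y programas de asistencia"),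
   ("social", "Fortalecer tu red de apoyo social es crucial")]

-- the for-loop of Source B: per barrier, update every rule's flag; break when all flags hold
def bLoop : List (List (String × String)) → List Bool → List Bool
  | [], flags => flags
  | b :: rest, flags =>
      let t := (PySem.Dict.mk b).get? "type"
      let flags := (bRules.zip flags).map (fun p => p.2 || (t == some p.1.1))
      if flags.all id then flags else bLoop rest flags

def generate_barrier_recommendations_py_alt (barriers : List (List (String × String))) : List String :=
  let flags := List.replicate bRules.length false
  let flags := bLoop barriers flags
  ((bRules.zip flags).filter (fun p => p.2)).map (fun p => p.1.2)

-- ===== PRECONDITION & SPEC =====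
def Spec_generate_barrier_recommendations_py (barriers : List (List (String × String))) (out : List String) : Prop := out = generate_barrier_recommendations_py_alt barriers
instance (barriers : List (List (String × String))) (out : List String) : Decidable (Spec_generate_barrier_recommendations_py barriers out) := by unfold Spec_generate_barrier_recommendations_py; infer_instance

-- ===== CLAIM (what is proved, stated in full; the proofs are below) =====
def Claim_equal_generate_barrier_recommendations_py : Prop := ∀ (barriers : List (List (String × String))), Dom_generate_barrier_recommendations_py barriers → Spec_generate_barrier_recommendations_py barriers (generate_barrier_recommendations_py barriers)

-- ===== LEMMAS AND PROOFS =====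
theorem bLoop_eq (bs : List (List (String × String))) : ∀ (f s : Bool),
    bLoop bs [f, s] =
      [f || bs.any (fun b => (PySem.Dict.mk b).get? "type" == some "financial"),
       s || bs.any (fun b => (PySem.Dict.mk b).get? "type" == some "social")] := by
  induction bs with
  | nil => intro f s; simp [bLoop]
  | cons b rest ih =>
      intro f s
      simp only [bLoop, bRules, List.zip, List.zipWith, List.map, List.all, List.any_cons, id]
      cases hf : (f || ((PySem.Dict.mk b).get? "type" == some "financial")) <;>
      cases hs : (s || ((PySem.Dict.mk b).get? "type" == some "social")) <;>
      simp [hf, hs, ih, ← Bool.or_assoc]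

-- ===== VERDICT (by name: the statement is the Claim_ definition above) =====
theorem generate_barrier_recommendations_py_spec : Claim_equal_generate_barrier_recommendations_py := by
  intro barriers _
  unfold Spec_generate_barrier_recommendations_py
  unfold generate_barrier_recommendations_py generate_barrier_recommendations_py_alt
  simp only [bRules, List.replicate, List.length, bLoop_eq, Bool.false_or]
  cases hf : barriers.any (fun b => (PySem.Dict.mk b).get? "type" == some "financial") <;>
  cases hs : barriers.any (fun b => (PySem.Dict.mk b).get? "type" == some "social") <;>
  simp [List.zip, List.zipWith, List.filter] <;>
  simp only [List.any_eq_true, List.any_eq_false, beq_iff_eq] at hf hs <;>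
  split_ifs <;> first | rfl | (exfalso; tauto)
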